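-- pv_equiv track=rewrite | github.com/Jordan-Sun/simulated-chem | simple_assignment.py | proximity_x
-- ===== SOURCE A (Python) =====
-- from typing import List, Tuple
--
-- def cord_to_index(width: int, _: int, x: int, y: int) -> int:
--     return x * width + y
--
-- def flipped_index_to_cord(_: int, height: int, i: int) -> Tuple[int, int]:
--     return (i % height, i // height)
--
-- def proximity_x(width: int, height: int, p: int) -> List[int]:
--     # the total number of samples is width times height
--     n = width * height
--     # the number of samples each processor will have
--     samples_per_processor = n // p
--     # the first remainder processors will have one more sample than the others
--     remainder = n % p
--     # the list of assignments
--     assignments = [0] * n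
--     # the last index that was assigned to a processor
--     last_index = 0
--     for i in range(p):
--         # assign the samples to the processor
--         for j in range(samples_per_processor):
--             x, y = flipped_index_to_cord(width, height, last_index + j)
--             assignments[cord_to_index(width, height, x, y)] = i
--         last_index += samples_per_processor
--         # if the processor has one more sample than the others, assign it
--         if i < remainder:
--             x, y = flipped_index_to_cord(width, height, last_index)
--             assignments[cord_to_index(width, height, x, y)] = i
--             last_index += 1
--     return assignments
-- ===== SOURCE B (Python) =====
-- def proximity_x(width: int, height: int, p: int) -> list:
--     n = width * height
--     spp, rem = divmod(n, p)
--     cut = rem * (spp + 1)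
--
--     def owner(k: int) -> int:
--         # closed-form owner of sample k in the balanced contiguous partition
--         return k // (spp + 1) if k < cut else rem + (k - cut) // spp
--
--     # build the output directly, position by position: position pos holds sample
--     # k = (pos % width) * height + pos // width of the flipped (transposed) order
--     return [owner((pos % width) * height + pos // width) for pos in range(n)]
-- ===== Notes on version B (the rewrite author's own statement) =====
-- stated objective: simpler
-- what changed: B replaces A's nested processor/sample scatter loops with running last_index by a single comprehension that computes each output position directly from a closed-form owner formula (k//(spp+1) below the remainder cut, else rem+(k-cut)//spp).
-- outside the precondition, e.g. on proximity_x(2, 3, -2): A returns [0, 0, 0, 0, 0, 0], B returns [0, -1, -1, -2, -1, -2]; on proximity_x(-2, -3, 2): A returns [1, 0, 1, 0, 0, 1], B returns [0, 0, -1, 0, -1, 0]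
import Mathlib
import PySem

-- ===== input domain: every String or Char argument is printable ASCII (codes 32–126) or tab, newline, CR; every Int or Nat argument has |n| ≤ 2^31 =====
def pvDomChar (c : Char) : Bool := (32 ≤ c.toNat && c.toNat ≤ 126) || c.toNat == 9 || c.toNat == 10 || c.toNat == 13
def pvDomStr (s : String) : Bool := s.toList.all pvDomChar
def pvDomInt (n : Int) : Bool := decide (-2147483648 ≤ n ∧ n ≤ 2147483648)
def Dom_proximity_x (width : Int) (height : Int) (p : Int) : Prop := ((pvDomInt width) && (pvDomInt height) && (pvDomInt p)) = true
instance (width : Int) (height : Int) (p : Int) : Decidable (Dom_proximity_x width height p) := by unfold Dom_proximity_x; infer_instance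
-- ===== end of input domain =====

-- B builds the output directly, position by position, from a closed-form owner formula,
-- instead of A's nested processor/sample scatter loops with a running last_index counter
-- (objective: simpler; same return value — neither version mutates its arguments).

-- ===== PORT A =====
def cord_to_index (width : Int) (_h : Int) (x : Int) (y : Int) : Int := x * width + y

def flipped_index_to_cord (_w : Int) (height : Int) (i : Int) : Int × Int :=
  (PySem.Int.mod i height, PySem.Int.floordiv i height)

-- pySetD is exact for Python's assignments[idx] = v (including negative in-range indices);
-- where Python would raise IndexError it is a no-op, and Pre_ excludes exactly those inputs.
def proximity_x (width : Int) (height : Int) (p : Int) : List Int :=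
  let n := width * height
  let samples_per_processor := PySem.Int.floordiv n p
  let remainder := PySem.Int.mod n p
  let assignments := List.replicate n.toNat (0 : Int)
  let st := (PySem.List.pyRange 0 p 1).foldl (fun (st : List Int × Int) i =>
      let acc1 := (PySem.List.pyRange 0 samples_per_processor 1).foldl (fun a j =>
          let xy := flipped_index_to_cord width height (st.2 + j)
          PySem.List.pySetD a (cord_to_index width height xy.1 xy.2) i) st.1
      let last1 := st.2 + samples_per_processor
      if i < remainder then
        let xy := flipped_index_to_cord width height last1
        (PySem.List.pySetD acc1 (cord_to_index width height xy.1 xy.2) i, last1 + 1)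
      else (acc1, last1)) (assignments, 0)
  st.1

-- ===== PORT B =====
def proximity_x_alt (width : Int) (height : Int) (p : Int) : List Int :=
  let n := width * height
  let spp := PySem.Int.floordiv n p
  let rem := PySem.Int.mod n p
  let cut := rem * (spp + 1)
  (PySem.List.pyRange 0 n 1).map (fun pos =>
    let k := PySem.Int.mod pos width * height + PySem.Int.floordiv pos width
    if k < cut then PySem.Int.floordiv k (spp + 1) else rem + PySem.Int.floordiv (k - cut) spp)

-- ===== PRECONDITION & SPEC =====
-- Pre_ restricts to the natural domain: nonzero p, and positive width/height/p whenever the grid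
-- is non-empty.  Outside it A either raises (p = 0: ZeroDivisionError; width*height < 0 with a
-- leftover sample: IndexError into the empty list) or returns values that are accidents of its
-- implementation (an all-zero list for p < 0 because range(p) is empty; negative-index wraparound
-- writes when both dimensions are negative).
def Pre_proximity_x (width : Int) (height : Int) (p : Int) : Prop :=
  p ≠ 0 ∧ (0 < width * height → (0 < p ∧ 0 < width ∧ 0 < height)) ∧
    ¬(width * height < 0 ∧ 0 < p ∧ PySem.Int.mod (width * height) p ≠ 0)
instance (width : Int) (height : Int) (p : Int) : Decidable (Pre_proximity_x width height p) := by
  unfold Pre_proximity_x; infer_instance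

def pvWitness_proximity_x : Int × Int × Int := (4, 3, 5)

def Spec_proximity_x (width : Int) (height : Int) (p : Int) (out : List Int) : Prop :=
  out = proximity_x_alt width height p
instance (width : Int) (height : Int) (p : Int) (out : List Int) : Decidable (Spec_proximity_x width height p out) := by
  unfold Spec_proximity_x; infer_instance

-- ===== CLAIM (what is proved, stated in full; the proofs are below) =====
def Claim_equal_proximity_x : Prop := ∀ (width : Int) (height : Int) (p : Int), Dom_proximity_x width height p → Pre_proximity_x width height p → Spec_proximity_x width height p (proximity_x width height p)


-- ===== LEMMAS AND PROOFS =====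

-- the write both sides of the proof reason about: assignments[(k % height)*width + k // height] = v
def pvWrite (width height : Int) (a : List Int) (kp : Int × Int) : List Int :=
  PySem.List.pySetD a (PySem.Int.mod kp.1 height * width + PySem.Int.floordiv kp.1 height) kp.2

-- A's loop body over one processor, as a named function (definitionally the fold body of proximity_x)
def pvAbody (width height spp rem : Int) (st : List Int × Int) (i : Int) : List Int × Int :=
  let acc1 := (PySem.List.pyRange 0 spp 1).foldl (fun a j =>
      let xy := flipped_index_to_cord width height (st.2 + j)
      PySem.List.pySetD a (cord_to_index width height xy.1 xy.2) i) st.1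
  let last1 := st.2 + spp
  if i < rem then
    let xy := flipped_index_to_cord width height last1
    (PySem.List.pySetD acc1 (cord_to_index width height xy.1 xy.2) i, last1 + 1)
  else (acc1, last1)

-- the block of samples processor i owns
def pvBlk (spp rem : Int) (i : Int) : List Int :=
  PySem.List.pyRepeat [i] (spp + (if i < rem then 1 else 0))

-- B's closed-form owner of sample k
def pvOwner (spp rem : Int) (k : Int) : Int :=
  if k < rem * (spp + 1) then PySem.Int.floordiv k (spp + 1)
  else rem + PySem.Int.floordiv (k - rem * (spp + 1)) spp

-- the transposed position map ((k % b)*a + k // b)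
def pvPos (a b k : Int) : Int := PySem.Int.mod k b * a + PySem.Int.floordiv k b

lemma pvA_eq (width height p : Int) :
    proximity_x width height p =
      ((PySem.List.pyRange 0 p 1).foldl
        (pvAbody width height (PySem.Int.floordiv (width*height) p) (PySem.Int.mod (width*height) p))
        (List.replicate (width*height).toNat 0, 0)).1 := rfl

lemma pvB_eq (width height p : Int) :
    proximity_x_alt width height p =
      (PySem.List.pyRange 0 (width*height) 1).map (fun pos =>
        pvOwner (PySem.Int.floordiv (width*height) p) (PySem.Int.mod (width*height) p)
          (pvPos height width pos)) := rfl

-- writing into the empty list is a no-op (Python would raise IndexError; Pre_ excludes that)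
@[simp] lemma pv_setD_nil (i : Int) (v : Int) : PySem.List.pySetD ([] : List Int) i v = [] := by
  have h : PySem.List.pySet? ([] : List Int) i v = none :=
    (PySem.List.pySet?_eq_none_iff _ _ _).mpr (by intro hir; obtain ⟨h1, h2⟩ := hir; simp at h1 h2; omega)
  simp [PySem.List.pySetD, h]

-- any fold whose step maps [] to [] leaves the empty list empty
lemma pv_foldl_nil {α : Type} (fn : List Int → α → List Int) (hfn : ∀ x, fn [] x = []) :
    ∀ l : List α, l.foldl fn [] = [] := by
  intro l
  induction l with
  | nil => rfl
  | cons x t ih => rw [List.foldl_cons, hfn x]; exact ih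

@[simp] lemma pv_inner_nil (width height spp : Int) (off i : Int) :
    (PySem.List.pyRange 0 spp 1).foldl (fun a j =>
        let xy := flipped_index_to_cord width height (off + j)
        PySem.List.pySetD a (cord_to_index width height xy.1 xy.2) i) ([] : List Int) = [] :=
  pv_foldl_nil _ (fun _ => pv_setD_nil _ _) _

-- the inner sample loop of A equals the write-fold over the enumerated replicate block
lemma pv_inner_eq (width height : Int) (m : Nat) :
    ∀ (off : Int) (acc : List Int) (i : Int),
    (PySem.List.pyRange 0 (m : Int) 1).foldl (fun a j =>
        let xy := flipped_index_to_cord width height (off + j)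
        PySem.List.pySetD a (cord_to_index width height xy.1 xy.2) i) acc
      = (PySem.List.enumerate (List.replicate m i) off).foldl (pvWrite width height) acc := by
  induction m with
  | zero => intro off acc i; rfl
  | succ m ih =>
      intro off acc i
      have hr : PySem.List.pyRange 0 ((m : Int) + 1) 1
          = PySem.List.pyRange 0 (m : Int) 1 ++ [(m : Int)] :=
        PySem.List.pyRange_one_succ_right (by exact_mod_cast Nat.zero_le m)
      rw [show ((m + 1 : Nat) : Int) = (m : Int) + 1 by push_cast; ring, hr,
        List.replicate_succ' (n := m), PySem.List.enumerate_append]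
      rw [List.foldl_append, List.foldl_append, ih]
      simp [pvWrite, flipped_index_to_cord, cord_to_index, PySem.List.enumerate_cons]

-- one step: A's processor body performs exactly the writes of B's block, and advances by its length
lemma pv_step (width height spp rem : Int) (hspp : 0 ≤ spp) (acc : List Int) (off i : Int) :
    pvAbody width height spp rem (acc, off) i
      = ((PySem.List.enumerate (pvBlk spp rem i) off).foldl (pvWrite width height) acc,
         off + ((pvBlk spp rem i).length : Int)) := by
  unfold pvAbody pvBlk
  rw [PySem.List.pyRepeat_singleton]
  by_cases hrem : i < rem
  · have h1 : (spp + (if i < rem then 1 else 0)).toNat = spp.toNat + 1 := by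
      simp [hrem]; omega
    rw [h1, List.replicate_succ' (n := spp.toNat), PySem.List.enumerate_append, List.foldl_append]
    have hm : ((spp.toNat : Nat) : Int) = spp := Int.toNat_of_nonneg hspp
    simp only [hrem, if_true]
    rw [show PySem.List.pyRange 0 spp 1 = PySem.List.pyRange 0 ((spp.toNat : Nat) : Int) 1 by rw [hm]]
    rw [pv_inner_eq width height spp.toNat off acc i]
    simp [pvWrite, flipped_index_to_cord, cord_to_index, PySem.List.enumerate_cons, hm]
    omega
  · have h1 : (spp + (if i < rem then 1 else 0)).toNat = spp.toNat := by
      simp [hrem]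
    have hm : ((spp.toNat : Nat) : Int) = spp := Int.toNat_of_nonneg hspp
    rw [h1]
    simp only [hrem, if_false]
    rw [show PySem.List.pyRange 0 spp 1 = PySem.List.pyRange 0 ((spp.toNat : Nat) : Int) 1 by rw [hm]]
    rw [pv_inner_eq width height spp.toNat off acc i]
    simp [hm]

-- the whole processor loop equals the write-fold over the enumerated concatenation of blocks
lemma pv_fold (width height spp rem : Int) (hspp : 0 ≤ spp) (l : List Int) :
    ∀ (acc : List Int) (off : Int),
    l.foldl (pvAbody width height spp rem) (acc, off)
      = ((PySem.List.enumerate (l.flatMap (pvBlk spp rem)) off).foldl (pvWrite width height) acc,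
         off + ((l.flatMap (pvBlk spp rem)).length : Int)) := by
  induction l with
  | nil => intro acc off; simp
  | cons x t ih =>
      intro acc off
      rw [List.foldl_cons, pv_step width height spp rem hspp acc off x, ih]
      rw [List.flatMap_cons, PySem.List.enumerate_append, List.foldl_append]
      simp [add_assoc]

-- the transposed position map is a bijection of [0, a*b) with inverse pvPos b a
lemma pv_key (a b k : Int) (ha : 0 < a) (hb : 0 < b) (h0 : 0 ≤ k) (hk : k < a * b) :
    0 ≤ pvPos a b k ∧ pvPos a b k < a * b ∧ pvPos b a (pvPos a b k) = k := by
  unfold pvPos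
  rw [PySem.Int.mod_eq_emod_of_pos hb, PySem.Int.floordiv_eq_ediv_of_pos hb]
  set x := k % b with hx
  set y := k / b with hy
  have hx0 : 0 ≤ x := Int.emod_nonneg k (ne_of_gt hb)
  have hxb : x < b := Int.emod_lt_of_pos k hb
  have hy0 : 0 ≤ y := Int.ediv_nonneg h0 (le_of_lt hb)
  have hyw : y < a := (Int.ediv_lt_iff_lt_mul hb).mpr (by linarith)
  have hpos0 : 0 ≤ x * a + y := add_nonneg (mul_nonneg hx0 (le_of_lt ha)) hy0
  have hposlt : x * a + y < a * b := by nlinarith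
  refine ⟨hpos0, hposlt, ?_⟩
  rw [PySem.Int.mod_eq_emod_of_pos ha, PySem.Int.floordiv_eq_ediv_of_pos ha]
  have h1 : (x * a + y) % a = y := by
    rw [show x * a + y = y + a * x by ring, Int.add_mul_emod_self_left,
      Int.emod_eq_of_lt hy0 hyw]
  have h2 : (x * a + y) / a = x := by
    rw [show x * a + y = y + a * x by ring, Int.add_mul_ediv_left y x (ne_of_gt ha),
      Int.ediv_eq_zero_of_lt hy0 hyw]
    ring
  rw [h1, h2]
  have h3 := Int.mul_ediv_add_emod k b
  linear_combination h3

-- one block of B's owner formula: processor j owns exactly [j*spp + min j rem, (j+1)*spp + min (j+1) rem)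
lemma pv_blk_one (spp rem : Int) (hspp : 0 ≤ spp) (j : Int) :
    pvBlk spp rem j
      = (PySem.List.pyRange (j * spp + min j rem) ((j + 1) * spp + min (j + 1) rem) 1).map
          (pvOwner spp rem) := by
  unfold pvBlk
  rw [PySem.List.pyRepeat_singleton]
  by_cases hc : j < rem
  · have hs1 : min j rem = j := min_eq_left (le_of_lt hc)
    have hs2 : min (j + 1) rem = j + 1 := min_eq_left (by omega)
    rw [hs1, hs2]
    have hrange : ∀ k ∈ PySem.List.pyRange (j * spp + j) ((j + 1) * spp + (j + 1)) 1,
        pvOwner spp rem k = (fun _ => j) k := by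
      intro k hk
      rw [PySem.List.mem_pyRange_one] at hk
      show pvOwner spp rem k = j
      unfold pvOwner
      have hcut : k < rem * (spp + 1) := by nlinarith [hk.2]
      rw [if_pos hcut, PySem.Int.floordiv_eq_ediv_of_pos (by omega : (0:Int) < spp + 1)]
      have hlo : j ≤ k / (spp + 1) := (Int.le_ediv_iff_mul_le (by omega)).mpr (by nlinarith [hk.1])
      have hhi : k / (spp + 1) < j + 1 := (Int.ediv_lt_iff_lt_mul (by omega)).mpr (by nlinarith [hk.2])
      omega
    rw [List.map_congr_left hrange, List.map_const', PySem.List.length_pyRange_one,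
      show (j + 1) * spp + (j + 1) - (j * spp + j) = spp + 1 by ring]
    simp [hc]
  · have hs1 : min j rem = rem := min_eq_right (by omega)
    have hs2 : min (j + 1) rem = rem := min_eq_right (by omega)
    rw [hs1, hs2]
    have hrange : ∀ k ∈ PySem.List.pyRange (j * spp + rem) ((j + 1) * spp + rem) 1,
        pvOwner spp rem k = (fun _ => j) k := by
      intro k hk
      rw [PySem.List.mem_pyRange_one] at hk
      show pvOwner spp rem k = j
      have hsp : 0 < spp := by nlinarith [hk.1, hk.2]
      unfold pvOwner
      have hcut : ¬ k < rem * (spp + 1) := not_lt.mpr (by nlinarith [hk.1])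
      rw [if_neg hcut, PySem.Int.floordiv_eq_ediv_of_pos hsp]
      have hlo : j - rem ≤ (k - rem * (spp + 1)) / spp :=
        (Int.le_ediv_iff_mul_le hsp).mpr (by nlinarith [hk.1])
      have hhi : (k - rem * (spp + 1)) / spp < j - rem + 1 :=
        (Int.ediv_lt_iff_lt_mul hsp).mpr (by nlinarith [hk.2])
      omega
    rw [List.map_congr_left hrange, List.map_const', PySem.List.length_pyRange_one,
      show (j + 1) * spp + rem - (j * spp + rem) = spp by ring]
    simp [hc]

-- the concatenation of B's blocks is the owner formula mapped over an initial segment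
lemma pv_seq (spp rem : Int) (hspp : 0 ≤ spp) (hrem0 : 0 ≤ rem) (j : Nat) :
    (PySem.List.pyRange 0 (j : Int) 1).flatMap (pvBlk spp rem)
      = (PySem.List.pyRange 0 ((j : Int) * spp + min (j : Int) rem) 1).map (pvOwner spp rem) := by
  induction j with
  | zero =>
      rw [show ((0 : Nat) : Int) = 0 from rfl,
        show (0 : Int) * spp + min (0 : Int) rem = 0 by rw [min_eq_left hrem0]; ring]
      rfl
  | succ m ih =>
      have hcast : ((m + 1 : Nat) : Int) = (m : Int) + 1 := by push_cast; ring
      rw [hcast, PySem.List.pyRange_one_succ_right (by exact_mod_cast Nat.zero_le m),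
        List.flatMap_append, ih]
      simp only [List.flatMap_cons, List.flatMap_nil, List.append_nil]
      rw [pv_blk_one spp rem hspp (m : Int), ← List.map_append]
      congr 1
      rw [← PySem.List.pyRange_one_append 0 ((m : Int) * spp + min (m : Int) rem)
          (((m : Int) + 1) * spp + min ((m : Int) + 1) rem) ?h1 ?h2]
      case h1 =>
        have : 0 ≤ (m : Int) * spp := mul_nonneg (by exact_mod_cast Nat.zero_le m) hspp
        have : 0 ≤ min (m : Int) rem := le_min (by exact_mod_cast Nat.zero_le m) hrem0
        omega
      case h2 =>
        have h1 : (m : Int) * spp ≤ ((m : Int) + 1) * spp := by nlinarith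
        have h2 : min (m : Int) rem ≤ min ((m : Int) + 1) rem :=
          min_le_min (by omega) (le_refl rem)
        omega

-- enumerating a comprehension over range(m) pairs each index with its value
lemma pv_enum (f : Int → Int) (m : Nat) :
    PySem.List.enumerate ((PySem.List.pyRange 0 (m : Int) 1).map f) 0
      = (PySem.List.pyRange 0 (m : Int) 1).map (fun k => (k, f k)) := by
  induction m with
  | zero => rfl
  | succ m ih =>
      have hcast : ((m + 1 : Nat) : Int) = (m : Int) + 1 := by push_cast; ring
      rw [hcast, PySem.List.pyRange_one_succ_right (by exact_mod_cast Nat.zero_le m),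
        List.map_append, PySem.List.enumerate_append, ih, List.map_append]
      simp [PySem.List.enumerate_cons, PySem.List.length_pyRange_one]

-- scattering f k to position pvPos w h k over k < m fills position pos with f (pvPos h w pos) once m covers it
lemma pv_scatter (w h : Int) (hw : 0 < w) (hh : 0 < h) (f : Int → Int) (m : Nat) (hm : (m : Int) ≤ w * h) :
    (PySem.List.pyRange 0 (m : Int) 1).foldl
        (fun a k => PySem.List.pySetD a (pvPos w h k) (f k)) (List.replicate (w * h).toNat 0)
      = (PySem.List.pyRange 0 (w * h) 1).map
          (fun pos => if pvPos h w pos < (m : Int) then f (pvPos h w pos) else 0) := by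
  induction m with
  | zero =>
      rw [show ((0 : Nat) : Int) = 0 from rfl]
      rw [PySem.List.pyRange_one_eq_nil (le_refl 0), List.foldl_nil]
      symm
      have hcongr : ∀ pos ∈ PySem.List.pyRange 0 (w * h) 1,
          (if pvPos h w pos < (0 : Int) then f (pvPos h w pos) else 0) = (fun _ => (0:Int)) pos := by
        intro pos hpos
        show (if pvPos h w pos < (0 : Int) then f (pvPos h w pos) else 0) = 0
        rw [PySem.List.mem_pyRange_one] at hpos
        have := (pv_key h w pos hh hw hpos.1 (by rw [mul_comm]; exact hpos.2)).1
        rw [if_neg (by omega)]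
      rw [List.map_congr_left hcongr, List.map_const', PySem.List.length_pyRange_one]
      simp
  | succ m ih =>
      have hm' : (m : Int) ≤ w * h := by push_cast at hm ⊢; omega
      have hcast : ((m + 1 : Nat) : Int) = (m : Int) + 1 := by push_cast; ring
      rw [hcast, PySem.List.pyRange_one_succ_right (by exact_mod_cast Nat.zero_le m),
        List.foldl_append, ih hm']
      simp only [List.foldl_cons, List.foldl_nil]
      have hmlt : (m : Int) < w * h := by rw [hcast] at hm; omega
      obtain ⟨hp0, hplt, hpinv⟩ :=
        pv_key w h (m : Int) hw hh (by exact_mod_cast Nat.zero_le m) hmlt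
      rw [PySem.List.pySetD_of_nonneg _ _ hp0]
      apply List.ext_getElem
      · simp [PySem.List.length_pyRange_one]
      · intro i h1 h2
        have hlen : i < (w * h).toNat := by
          simpa [PySem.List.length_pyRange_one] using h2
        have hiwh : (i : Int) < w * h := by omega
        rw [List.getElem_set]
        rw [List.getElem_map, List.getElem_map]
        rw [PySem.List.getElem_pyRange_one]
        simp only [zero_add]
        by_cases heq : (pvPos w h (m : Int)).toNat = i
        · have hieq : (i : Int) = pvPos w h (m : Int) := by omega
          rw [if_pos heq, hieq, hpinv, if_pos (by omega)]
        · rw [if_neg heq]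
          have hne : pvPos h w (i : Int) ≠ (m : Int) := by
            intro habs
            obtain ⟨hk0, hklt, hkinv⟩ :=
              pv_key h w (i : Int) hh hw (by exact_mod_cast Nat.zero_le i)
                (by rw [mul_comm]; exact hiwh)
            rw [habs] at hkinv
            omega
          by_cases hlt : pvPos h w (i : Int) < (m : Int)
          · rw [if_pos hlt, if_pos (by omega)]
          · rw [if_neg hlt, if_neg (by omega)]

-- main case: positive dimensions and processor count
lemma pv_main (w h p : Int) (hp : 0 < p) (hw : 0 < w) (hh : 0 < h) :
    proximity_x w h p = proximity_x_alt w h p := by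
  have hn : 0 ≤ w * h := mul_nonneg (le_of_lt hw) (le_of_lt hh)
  have hspp : 0 ≤ PySem.Int.floordiv (w * h) p :=
    (PySem.Int.le_floordiv_iff_mul_le hp).mpr (by simpa using hn)
  have hrem0 : 0 ≤ PySem.Int.mod (w * h) p := PySem.Int.mod_nonneg _ hp
  have hremp : PySem.Int.mod (w * h) p < p := PySem.Int.mod_lt _ hp
  have hcastp : ((p.toNat : Nat) : Int) = p := Int.toNat_of_nonneg (le_of_lt hp)
  have hcastn : (((w * h).toNat : Nat) : Int) = w * h := Int.toNat_of_nonneg hn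
  rw [pvA_eq, pvB_eq,
    pv_fold w h _ _ hspp (PySem.List.pyRange 0 p 1) (List.replicate (w * h).toNat 0) 0]
  simp only
  rw [show PySem.List.pyRange 0 p 1 = PySem.List.pyRange 0 ((p.toNat : Nat) : Int) 1 by rw [hcastp]]
  rw [pv_seq _ _ hspp hrem0 p.toNat]
  have hstart : ((p.toNat : Nat) : Int) * PySem.Int.floordiv (w * h) p
      + min ((p.toNat : Nat) : Int) (PySem.Int.mod (w * h) p) = w * h := by
    rw [hcastp, min_eq_right (le_of_lt hremp)]
    have := PySem.Int.floordiv_mul_add_mod (w * h) p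
    linear_combination this
  rw [hstart,
    show PySem.List.pyRange 0 (w * h) 1 = PySem.List.pyRange 0 (((w * h).toNat : Nat) : Int) 1 by
      rw [hcastn]]
  rw [pv_enum, List.foldl_map]
  have hbody : (fun (a : List Int) (k : Int) =>
        pvWrite w h a (k, pvOwner (PySem.Int.floordiv (w * h) p) (PySem.Int.mod (w * h) p) k))
      = fun a k => PySem.List.pySetD a (pvPos w h k)
          (pvOwner (PySem.Int.floordiv (w * h) p) (PySem.Int.mod (w * h) p) k) := rfl
  rw [hbody, pv_scatter w h hw hh _ (w * h).toNat (by omega), hcastn]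
  apply List.map_congr_left
  intro pos hpos
  rw [PySem.List.mem_pyRange_one] at hpos
  have hposlt : pos < w * h := hpos.2
  have := (pv_key h w pos hh hw hpos.1 (by rw [mul_comm]; exact hposlt)).2.1
  rw [if_pos (by rw [mul_comm h w] at this; omega)]

-- empty grid (width*height ≤ 0): A's list is empty and every write is a no-op, B's range is empty
lemma pv_nil (w h p : Int) (hn : w * h ≤ 0) :
    proximity_x w h p = proximity_x_alt w h p := by
  have hz : (w * h).toNat = 0 := by omega
  have hB : proximity_x_alt w h p = [] := by
    rw [pvB_eq, PySem.List.pyRange_one_eq_nil hn, List.map_nil]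
  rw [hB, pvA_eq, hz]
  simp only [List.replicate_zero]
  have hA : ∀ (l : List Int) (st : List Int × Int), st.1 = [] →
      (l.foldl (pvAbody w h (PySem.Int.floordiv (w*h) p) (PySem.Int.mod (w*h) p)) st).1 = [] := by
    intro l
    induction l with
    | nil => intro st hst; exact hst
    | cons x t ih =>
        intro st hst
        rw [List.foldl_cons]
        apply ih
        obtain ⟨s1, s2⟩ := st
        simp only at hst
        subst hst
        show (pvAbody w h _ _ ([], s2) x).1 = []
        unfold pvAbody
        by_cases hb : x < PySem.Int.mod (w*h) p <;> simp [hb]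
  exact hA _ _ rfl

-- ===== VERDICT (by name: the statement is the Claim_ definition above) =====
theorem proximity_x_spec : Claim_equal_proximity_x := by
  intro width height p _hdom hpre
  obtain ⟨hp0, hpos, _hcr⟩ := hpre
  unfold Spec_proximity_x
  by_cases hn : width * height ≤ 0
  · exact pv_nil width height p hn
  · obtain ⟨hp, hw, hh⟩ := hpos (by omega)
    exact pv_main width height p hp hw hh
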